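-- pv_equiv track=rewrite | github.com/MirAn55500/aaa-algorithms | solution_1.py | get_level_order_keys_and_levels
-- ===== SOURCE A (Python) =====
-- class TreeNode:
--
--     def __init__(self, parent, key: int):
--         self.key = key
--         self.left = None
--         self.right = None
--         self.parent = parent
--     def insert(self, node):
--         if node is None:
--             return
--         if node.key < self.key:
--             if self.left is None:
--                 node.parent = self
--                 self.left = node
--             else:
--                 self.left.insert(node)
--         else:
--             if self.right is None:
--                 node.parent = self
--                 self.right = node
--             else:
--                 self.right.insert(node)
--
-- def get_level_order_keys_and_levels(preorder_keys: list):
--     root = TreeNode(parent=None, key=preorder_keys[0])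
--     keys = [root.key]
--     levels = [0]
--
--     for i in preorder_keys[1:]:
--         node = TreeNode(parent=None, key=i)
--         root.insert(node)
--
--     current_level = [root]
--
--     while current_level:
--         next_level = []
--         next_level_levels = []
--
--         for node in current_level:
--             if node.left is not None:
--                 keys.append(node.left.key)
--                 next_level.append(node.left)
--                 next_level_levels.append(levels[-1] + 1)
--
--             if node.right is not None:
--                 keys.append(node.right.key)
--                 next_level.append(node.right)
--                 next_level_levels.append(levels[-1] + 1)
--
--         current_level = next_level
--         levels += next_level_levels
--
--     return keys, levels
-- ===== SOURCE B (Python) =====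
-- def get_level_order_keys_and_levels(preorder_keys: list):
--     # Tree as nested tuples (key, left, right); None = empty.
--     def ins(t, k):
--         if t is None:
--             return (k, None, None)
--         key, left, right = t
--         if k < key:
--             return (key, ins(left, k), right)
--         return (key, left, ins(right, k))
--
--     def zip_app(xs, ys):
--         if not xs:
--             return ys
--         if not ys:
--             return xs
--         return [xs[0] + ys[0]] + zip_app(xs[1:], ys[1:])
--
--     def level_lists(t):
--         if t is None:
--             return []
--         key, left, right = t
--         return [[key]] + zip_app(level_lists(left), level_lists(right))
--
--     t = None
--     for k in preorder_keys:
--         t = ins(t, k)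
--
--     keys, levels, d = [], [], 0
--     for lvl in level_lists(t):
--         keys += lvl
--         levels += [d] * len(lvl)
--         d += 1
--     return keys, levels
-- ===== Notes on version B (the rewrite author's own statement) =====
-- stated objective: alternative
-- what changed: B replaces A's explicit BFS queue with its running last-level bookkeeping by a recursive zip-append merge of per-subtree level lists, on a functional nested-tuple tree instead of mutated node objects.
import Mathlib
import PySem

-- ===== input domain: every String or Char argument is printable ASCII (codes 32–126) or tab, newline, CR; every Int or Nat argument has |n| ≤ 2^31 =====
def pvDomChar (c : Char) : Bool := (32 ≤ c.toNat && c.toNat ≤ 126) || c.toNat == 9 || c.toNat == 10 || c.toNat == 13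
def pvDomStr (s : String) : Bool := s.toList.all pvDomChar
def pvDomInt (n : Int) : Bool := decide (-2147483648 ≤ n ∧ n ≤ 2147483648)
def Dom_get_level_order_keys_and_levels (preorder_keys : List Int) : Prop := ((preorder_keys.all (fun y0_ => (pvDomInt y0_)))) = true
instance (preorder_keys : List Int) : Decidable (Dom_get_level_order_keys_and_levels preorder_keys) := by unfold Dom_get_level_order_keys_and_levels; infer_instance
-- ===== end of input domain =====

-- B replaces A's explicit BFS queue (with its running last-level bookkeeping) by a recursive
-- zip-append merge of per-subtree level lists on a functional tree; objective: alternative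
-- (same asymptotic cost). A mutates nothing observable by the caller.

-- ===== PORT A =====
-- Binary tree of A's TreeNode objects; parent pointers are dropped (they never affect the result).
inductive PTree where
  | nil : PTree
  | node : PTree → Int → PTree → PTree
deriving DecidableEq, Repr

def PTree.size : PTree → Nat
  | .nil => 0
  | .node l _ r => l.size + r.size + 1

def sizeSum (ns : List PTree) : Nat := (ns.map PTree.size).sum

def childrenOf : PTree → List PTree
  | .nil => []
  | .node l _ r =>
    (match l with | .nil => [] | .node a k b => [PTree.node a k b]) ++
    (match r with | .nil => [] | .node a k b => [PTree.node a k b])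

def keyOf : PTree → Int
  | .nil => 0
  | .node _ k _ => k

-- TreeNode.insert (the mutating method, as the updated-tree it leaves behind)
def insA : PTree → Int → PTree
  | .nil, i => .node .nil i .nil          -- unreachable: insert is only called on existing nodes
  | .node l k r, i =>
    if i < k then
      match l with
      | .nil => .node (.node .nil i .nil) k r
      | .node a lk b => .node (insA (.node a lk b) i) k r
    else
      match r with
      | .nil => .node l k (.node .nil i .nil)
      | .node a rk b => .node l k (insA (.node a rk b) i)

-- one node of the inner 'for node in current_level' pass: appends to (keys-suffix, next_level, next_level_levels)
def bfsStep (d : Int) (acc : List Int × List PTree × List Int) (t : PTree) :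
    List Int × List PTree × List Int :=
  match t with
  | .nil => acc
  | .node l _ r =>
    let acc1 := match l with
      | .nil => acc
      | .node a lk b => (acc.1 ++ [lk], acc.2.1 ++ [PTree.node a lk b], acc.2.2 ++ [d + 1])
    match r with
    | .nil => acc1
    | .node a rk b => (acc1.1 ++ [rk], acc1.2.1 ++ [PTree.node a rk b], acc1.2.2 ++ [d + 1])

-- lemmas the port needs for termination of loopA
theorem bfsStep_foldl (d : Int) (ns : List PTree) : ∀ (a : List Int) (b : List PTree) (c : List Int),
    ns.foldl (bfsStep d) (a, b, c) =
      (a ++ (ns.flatMap childrenOf).map keyOf,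
       b ++ ns.flatMap childrenOf,
       c ++ List.replicate (ns.flatMap childrenOf).length (d + 1)) := by
  induction ns with
  | nil => intro a b c; simp
  | cons t rest ih =>
    intro a b c
    cases t with
    | nil => simp [bfsStep, childrenOf, ih]
    | node l k r =>
      cases l <;> cases r <;>
        simp [bfsStep, childrenOf, keyOf, ih, List.replicate_succ]

theorem sizeSum_childrenOf (t : PTree) : sizeSum (childrenOf t) + (if t = .nil then 0 else 1) = t.size := by
  cases t with
  | nil => simp [childrenOf, sizeSum, PTree.size]
  | node l k r => cases l <;> cases r <;> simp [childrenOf, sizeSum, PTree.size]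

theorem sizeSum_children_le (ns : List PTree) : sizeSum (ns.flatMap childrenOf) ≤ sizeSum ns := by
  induction ns with
  | nil => simp [sizeSum]
  | cons t rest ih =>
    have h := sizeSum_childrenOf t
    simp only [List.flatMap_cons, sizeSum, List.map_append, List.sum_append, List.map_cons,
      List.sum_cons] at *
    split at h <;> omega

theorem sizeSum_children_lt (ns : List PTree) (hne : ns.flatMap childrenOf ≠ []) :
    sizeSum (ns.flatMap childrenOf) < sizeSum ns := by
  induction ns with
  | nil => simp at hne
  | cons t rest ih =>
    by_cases hc : childrenOf t = []
    · have hr : rest.flatMap childrenOf ≠ [] := by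
        simpa [List.flatMap_cons, hc] using hne
      have := ih hr
      have h2 := sizeSum_childrenOf t
      simp only [List.flatMap_cons, sizeSum, List.map_append, List.sum_append, List.map_cons,
        List.sum_cons] at *
      split at h2 <;> omega
    · have ht : t ≠ .nil := by intro he; subst he; simp [childrenOf] at hc
      have h2 := sizeSum_childrenOf t
      have h3 := sizeSum_children_le rest
      simp only [ht, ite_false] at h2
      simp only [List.flatMap_cons, sizeSum, List.map_append, List.sum_append, List.map_cons,
        List.sum_cons] at *
      omega

-- the 'while current_level:' loop, carrying (keys, levels)
def loopA (ns : List PTree) (keys levels : List Int) : List Int × List Int :=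
  if h : ns = [] then (keys, levels)
  else
    let d := levels.getLastD 0                         -- last element of levels (never empty in A)
    let res := ns.foldl (bfsStep d) ([], [], [])
    loopA res.2.1 (keys ++ res.1) (levels ++ res.2.2)
termination_by sizeSum ns + (if ns = [] then 0 else 1)
decreasing_by
  simp only [List.foldl_attach]
  rw [bfsStep_foldl]
  simp only [List.nil_append]
  by_cases hX : ns.flatMap childrenOf = []
  · simp [hX, sizeSum, h]
  · have := sizeSum_children_lt ns hX
    simp [hX, h]
    omega

def get_level_order_keys_and_levels (preorder_keys : List Int) : List Int × List Int :=
  match preorder_keys with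
  | [] => ([], [])                                      -- indexing the first element raises IndexError on the empty list: outside Pre_
  | k0 :: rest =>
    let root := rest.foldl insA (.node .nil k0 .nil)    -- build by repeated root.insert
    loopA [root] [k0] [0]

-- ===== PORT B =====
def zipApp : List (List Int) → List (List Int) → List (List Int)
  | [], ys => ys
  | x :: xs, [] => x :: xs
  | x :: xs, y :: ys => (x ++ y) :: zipApp xs ys

def insB : PTree → Int → PTree
  | .nil, k => .node .nil k .nil
  | .node l key r, k =>
    if k < key then .node (insB l k) key r else .node l key (insB r k)

def lvB : PTree → List (List Int)
  | .nil => []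
  | .node l k r => [k] :: zipApp (lvB l) (lvB r)

def get_level_order_keys_and_levels_alt (preorder_keys : List Int) : List Int × List Int :=
  let t := preorder_keys.foldl insB .nil
  let out := (lvB t).foldl
    (fun (acc : List Int × List Int × Int) lvl =>
      (acc.1 ++ lvl, acc.2.1 ++ List.replicate lvl.length acc.2.2, acc.2.2 + 1))
    ([], [], 0)
  (out.1, out.2.1)

-- ===== PRECONDITION & SPEC =====
-- A indexes the first element up front: it raises IndexError exactly on the empty list.
def Pre_get_level_order_keys_and_levels (preorder_keys : List Int) : Prop := preorder_keys ≠ []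
instance (preorder_keys : List Int) : Decidable (Pre_get_level_order_keys_and_levels preorder_keys) := by unfold Pre_get_level_order_keys_and_levels; infer_instance
def pvWitness_get_level_order_keys_and_levels : List Int := [2, 1, 3, 1]

def Spec_get_level_order_keys_and_levels (preorder_keys : List Int) (out : List Int × List Int) : Prop := out = get_level_order_keys_and_levels_alt preorder_keys
instance (preorder_keys : List Int) (out : List Int × List Int) : Decidable (Spec_get_level_order_keys_and_levels preorder_keys out) := by unfold Spec_get_level_order_keys_and_levels; infer_instance

-- ===== CLAIM =====
def Claim_equal_get_level_order_keys_and_levels : Prop := ∀ (preorder_keys : List Int), Dom_get_level_order_keys_and_levels preorder_keys → Pre_get_level_order_keys_and_levels preorder_keys → Spec_get_level_order_keys_and_levels preorder_keys (get_level_order_keys_and_levels preorder_keys)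

-- ===== LEMMAS AND PROOFS =====

theorem insA_eq_insB (t : PTree) (i : Int) : insA t i = insB t i := by
  induction t with
  | nil => simp [insA, insB]
  | node l k r ihl ihr =>
    cases l <;> cases r <;> simp [insA, insB, ihl, ihr]

theorem zipApp_nil_right (xs : List (List Int)) : zipApp xs [] = xs := by
  cases xs <;> simp [zipApp]

theorem zipApp_assoc (a b c : List (List Int)) :
    zipApp (zipApp a b) c = zipApp a (zipApp b c) := by
  induction a generalizing b c with
  | nil => simp [zipApp]
  | cons x xs ih =>
    cases b <;> cases c <;> simp [zipApp, zipApp_nil_right, ih]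

-- combined level lists of a forest
def lvs : List PTree → List (List Int)
  | [] => []
  | t :: ns => zipApp (lvB t) (lvs ns)

theorem lvs_append (xs ys : List PTree) : lvs (xs ++ ys) = zipApp (lvs xs) (lvs ys) := by
  induction xs with
  | nil => simp [lvs, zipApp]
  | cons t rest ih => simp [lvs, ih, zipApp_assoc]

theorem lvB_node (t : PTree) (h : t ≠ .nil) :
    lvB t = [keyOf t] :: lvs (childrenOf t) := by
  cases t with
  | nil => exact absurd rfl h
  | node l k r =>
    cases l <;> cases r <;>
      simp [lvB, childrenOf, lvs, keyOf, zipApp, zipApp_nil_right]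

theorem childrenOf_ne_nil (t : PTree) : ∀ u ∈ childrenOf t, u ≠ .nil := by
  cases t with
  | nil => simp [childrenOf]
  | node l k r => cases l <;> cases r <;> simp [childrenOf]

theorem lvs_cons_eq (ms : List PTree) (hne : ms ≠ []) (hnn : ∀ t ∈ ms, t ≠ .nil) :
    lvs ms = (ms.map keyOf) :: lvs (ms.flatMap childrenOf) := by
  induction ms with
  | nil => exact absurd rfl hne
  | cons t rest ih =>
    have ht : t ≠ .nil := hnn t (by simp)
    cases rest with
    | nil => simp [lvs, zipApp_nil_right, lvB_node t ht]
    | cons u us =>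
      have hr := ih (by simp) (fun x hx => hnn x (by simp [hx]))
      show zipApp (lvB t) (lvs (u :: us)) = _
      rw [lvB_node t ht, hr, List.flatMap_cons]
      simp [zipApp, lvs_append]

-- level labels: depths d, d+1, … repeated by level sizes
def goLvl : Int → List (List Int) → List Int
  | _, [] => []
  | d, lvl :: rest => List.replicate lvl.length d ++ goLvl (d + 1) rest

theorem loopA_spec (n : Nat) : ∀ (ns : List PTree) (keys L : List Int) (d : Int),
    sizeSum ns ≤ n →
    loopA ns keys (L ++ [d]) =
      (keys ++ (lvs (ns.flatMap childrenOf)).flatten,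
       (L ++ [d]) ++ goLvl (d + 1) (lvs (ns.flatMap childrenOf))) := by
  induction n with
  | zero =>
    intro ns keys L d hsz
    by_cases h : ns = []
    · subst h; simp [loopA, lvs, goLvl]
    · rw [loopA]
      simp only [h, dite_false, bfsStep_foldl, List.nil_append]
      have hms : ns.flatMap childrenOf = [] := by
        by_contra hne
        have := sizeSum_children_lt ns hne
        omega
      simp [hms, loopA, lvs, goLvl]
  | succ n ih =>
    intro ns keys L d hsz
    by_cases h : ns = []
    · subst h; simp [loopA, lvs, goLvl]
    · rw [loopA]
      simp only [h, dite_false, bfsStep_foldl, List.nil_append, List.getLastD_concat]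
      by_cases hms : ns.flatMap childrenOf = []
      · simp [hms, loopA, lvs, goLvl]
      · set ms := ns.flatMap childrenOf with hms_def
        have hlt : sizeSum ms < sizeSum ns := sizeSum_children_lt ns hms
        have hnn : ∀ t ∈ ms, t ≠ .nil := by
          intro t htm
          rw [hms_def, List.mem_flatMap] at htm
          obtain ⟨u, _, hu⟩ := htm
          exact childrenOf_ne_nil u t hu
        have hlen : ms.length ≠ 0 := by simpa using hms
        obtain ⟨m, hm⟩ : ∃ m, ms.length = m + 1 := ⟨ms.length - 1, by omega⟩
        have hrep : List.replicate ms.length (d + 1) =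
            List.replicate m (d + 1) ++ [d + 1] := by
          rw [hm, List.replicate_succ']
        rw [hrep, ← List.append_assoc]
        rw [ih ms (keys ++ ms.map keyOf) (L ++ [d] ++ List.replicate m (d + 1)) (d + 1)
          (by omega)]
        rw [lvs_cons_eq ms hms hnn]
        simp [goLvl, hm, List.replicate_succ', List.append_assoc]

theorem altFold (res : List (List Int)) : ∀ (a b : List Int) (d : Int),
    res.foldl
      (fun (acc : List Int × List Int × Int) lvl =>
        (acc.1 ++ lvl, acc.2.1 ++ List.replicate lvl.length acc.2.2, acc.2.2 + 1))
      (a, b, d) =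
      (a ++ res.flatten, b ++ goLvl d res, d + (res.length : Int)) := by
  induction res with
  | nil => intro a b d; simp [goLvl]
  | cons lvl rest ih =>
    intro a b d
    simp only [List.foldl_cons, ih, List.flatten_cons, goLvl, List.length_cons]
    simp only [List.append_assoc, Prod.mk.injEq]
    exact ⟨trivial, trivial, by push_cast; ring⟩

theorem foldl_insB_node (xs : List Int) : ∀ (l r : PTree) (k : Int),
    ∃ l' r', xs.foldl insB (.node l k r) = .node l' k r' := by
  induction xs with
  | nil => intro l r k; exact ⟨l, r, rfl⟩
  | cons x rest ih =>
    intro l r k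
    simp only [List.foldl_cons, insB]
    split
    · exact ih _ _ _
    · exact ih _ _ _

-- ===== VERDICT =====
theorem get_level_order_keys_and_levels_spec : Claim_equal_get_level_order_keys_and_levels := by
  intro preorder_keys _ hpre
  unfold Spec_get_level_order_keys_and_levels
  cases preorder_keys with
  | nil => exact absurd rfl hpre
  | cons k0 rest =>
    have hAB : insA = insB := funext fun t => funext fun i => insA_eq_insB t i
    obtain ⟨l', r', ht⟩ := foldl_insB_node rest .nil .nil k0
    simp only [get_level_order_keys_and_levels, get_level_order_keys_and_levels_alt,
      List.foldl_cons, insB, hAB]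
    rw [ht]
    have hloop := loopA_spec (sizeSum [PTree.node l' k0 r']) [PTree.node l' k0 r'] [k0] [] 0
      (le_refl _)
    simp only [List.nil_append] at hloop
    rw [hloop]
    have hnode : (PTree.node l' k0 r') ≠ .nil := by simp
    rw [lvB_node _ hnode, altFold]
    simp [keyOf, goLvl, childrenOf]
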